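-- pv_equiv track=rewrite | github.com/neharathi968/DSA-mini | kmap.py | minterms_to_literal
-- ===== SOURCE A (Python) =====
-- from typing import Optional, List, Tuple, Set, Dict, Any
--
-- def minterms_to_literal(minterms: Set[int], vars_list: List[str]) -> str:
--     """
--     Convert a set of minterms (integers) that form a block into a literal expression.
--     Example: minterms {0,1} for vars [A,B] -> "~A & ~B" etc, but this function finds common bits.
--     """
--     n = len(vars_list)
--     bits_list = [format(m, f'0{n}b') for m in sorted(minterms)]
--     common = []
--     for pos in range(n):
--         col = [b[pos] for b in bits_list]
--         if all(x == col[0] for x in col):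
--             common.append(col[0])
--         else:
--             common.append('-')  # varying bit
--     parts = []
--     for bit, var in zip(common, vars_list):
--         if bit == '1':
--             parts.append(var)
--         elif bit == '0':
--             parts.append(f'~{var}')
--     if not parts:  # covers full space
--         return "1"
--     return " & ".join(parts)
-- ===== SOURCE B (Python) =====
-- def minterms_to_literal(minterms, vars_list):
--     """Single merging pass: fold the minterms' binary renderings into one common
--     pattern, replacing disagreeing positions by '-', then read the literal off it."""
--     n = len(vars_list)
--     ms = iter(minterms)
--     common = format(next(ms), f'0{n}b')[:n]
--     for m in ms:
--         common = [c if b == c else '-' for c, b in zip(common, format(m, f'0{n}b'))]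
--     parts = [v if c == '1' else '~' + v for c, v in zip(common, vars_list) if c in '10']
--     return " & ".join(parts) if parts else "1"
-- ===== Notes on version B (the rewrite author's own statement) =====
-- stated objective: simpler
-- what changed: Instead of sorting the minterms, formatting them into a list of bit strings and scanning each of the n columns for agreement, B folds the minterms in one row-wise merging pass into a single common pattern (disagreeing positions become '-') and reads the literal off that pattern; Pre_ excludes only the empty minterm set, on which A raises IndexError whenever vars_list is nonempty and B's merge has no first pattern to start from (StopIteration).
-- outside the precondition, e.g. on minterms_to_literal(set(), []): A returns '1', B raises StopIteration
import Mathlib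
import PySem

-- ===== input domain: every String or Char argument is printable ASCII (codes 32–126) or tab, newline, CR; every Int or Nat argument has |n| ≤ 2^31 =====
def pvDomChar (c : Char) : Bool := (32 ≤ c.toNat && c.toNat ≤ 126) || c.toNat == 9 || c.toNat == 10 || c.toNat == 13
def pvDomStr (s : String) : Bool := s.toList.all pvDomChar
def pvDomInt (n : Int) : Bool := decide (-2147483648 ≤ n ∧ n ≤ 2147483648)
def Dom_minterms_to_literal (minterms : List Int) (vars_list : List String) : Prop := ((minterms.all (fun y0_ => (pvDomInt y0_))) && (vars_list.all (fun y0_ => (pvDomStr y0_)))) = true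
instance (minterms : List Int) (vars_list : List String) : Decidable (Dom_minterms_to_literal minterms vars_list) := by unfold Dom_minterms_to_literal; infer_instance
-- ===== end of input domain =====

-- B replaces A's sort + per-column agreement scan over a list of bit strings by one
-- row-wise merging pass that folds the minterms into a single common pattern (objective: simpler).

-- ===== PORT A =====
-- pvWidth/pvSym/pvFmtBin are a hand port of the builtin format(m, f'0{n}b') as a list of
-- chars: pvFmtBin gives the first n characters of the formatted string (sign, zero padding,
-- then binary digits of |m|), which are exactly the characters A's column scan reads
-- (b[pos] for pos < n; the string's length is always ≥ n).
def pvWidth (n : Nat) (m : Int) : Nat :=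
  max n (max 1 m.natAbs.size + (if m < 0 then 1 else 0))

def pvShift (n : Nat) (m : Int) : Nat := m.natAbs >>> (pvWidth n m - n)

def pvSym (n : Nat) (m : Int) (j : Nat) : Char :=
  if m < 0 ∧ j = 0 then '-'
  else if (pvShift n m).testBit (n - 1 - j) then '1' else '0'

def pvFmtBin (n : Nat) (m : Int) : List Char := (List.range n).map (pvSym n m)

def minterms_to_literal (minterms : List Int) (vars_list : List String) : String :=
  let n := vars_list.length
  let bits_list := (PySem.List.sorted minterms (fun x => x) false).map (fun m => pvFmtBin n m)
  let common := (List.range n).map (fun pos =>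
    let col := bits_list.map (fun b => b.getD pos ' ')
    match col with
    | [] => '-'                       -- Python raises IndexError (col[0]) here; outside Pre_
    | c :: _ => if col.all (fun x => x == c) then c else '-')
  let parts := (common.zip vars_list).foldl
    (fun acc p =>
      if p.1 = '1' then acc ++ [p.2]
      else if p.1 = '0' then acc ++ ["~" ++ p.2]
      else acc) []
  if parts = [] then "1" else PySem.Str.join " & " parts

-- ===== PORT B =====
-- pvSymW/pvFmt are a hand port of format(m, f'0{n}b') as the FULL list of characters
-- (length pvWidth n m): '-' sign first for negative m, then the zero-padded binary
-- digits of |m|; exact for every Int.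
def pvSymW (n : Nat) (m : Int) (j : Nat) : Char :=
  if m < 0 ∧ j = 0 then '-'
  else if m.natAbs.testBit (pvWidth n m - 1 - j) then '1' else '0'

def pvFmt (n : Nat) (m : Int) : List Char := (List.range (pvWidth n m)).map (pvSymW n m)

def minterms_to_literal_alt (minterms : List Int) (vars_list : List String) : String :=
  let n := vars_list.length
  match minterms with
  | [] => ""                          -- Python's next(ms) raises StopIteration here; outside Pre_
  | m0 :: ms =>
    let common := (pvFmt n m0).take n            -- format(next(ms), f'0{n}b')[:n]
    let common := ms.foldl (fun c m =>
        (c.zip (pvFmt n m)).map (fun p => if p.2 == p.1 then p.1 else '-')) common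
    -- the comprehension's filter `c in '10'` is exactly "c is '1' or c is '0'"
    let parts := (common.zip vars_list).filterMap (fun p =>
        if p.1 == '1' || p.1 == '0' then some (if p.1 == '1' then p.2 else "~" ++ p.2) else none)
    if parts = [] then "1" else PySem.Str.join " & " parts

-- ===== PRECONDITION & SPEC =====
-- Pre_ excludes only the empty minterm set: there A raises IndexError (col[0]) whenever
-- vars_list is nonempty, and B's merging pass has no first pattern (next raises StopIteration);
-- in the doubly-degenerate case ([], []) A returns "1" while B still raises.
def Pre_minterms_to_literal (minterms : List Int) (vars_list : List String) : Prop :=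
  minterms ≠ []
instance (minterms : List Int) (vars_list : List String) : Decidable (Pre_minterms_to_literal minterms vars_list) := by unfold Pre_minterms_to_literal; infer_instance

def pvWitness_minterms_to_literal : List Int × List String := ([0, 1], ["A", "B"])

def Spec_minterms_to_literal (minterms : List Int) (vars_list : List String) (out : String) : Prop := out = minterms_to_literal_alt minterms vars_list
instance (minterms : List Int) (vars_list : List String) (out : String) : Decidable (Spec_minterms_to_literal minterms vars_list out) := by unfold Spec_minterms_to_literal; infer_instance

-- ===== CLAIM (what is proved, stated in full; the proofs are below) =====
def Claim_equal_minterms_to_literal : Prop := ∀ (minterms : List Int) (vars_list : List String), Dom_minterms_to_literal minterms vars_list → Pre_minterms_to_literal minterms vars_list → Spec_minterms_to_literal minterms vars_list (minterms_to_literal minterms vars_list)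

-- ===== LEMMAS AND PROOFS =====

-- the list of literals both programs produce, indexed from position i
def pvG (l : List Int) (n : Nat) : List String → Nat → List String
  | [], _ => []
  | v :: vs, i =>
      (if l.all (fun m => pvSym n m i == '1') then [v]
       else if l.all (fun m => pvSym n m i == '0') then ["~" ++ v] else []) ++ pvG l n vs (i + 1)

theorem pv_sym_cases (n : Nat) (m : Int) (j : Nat) :
    pvSym n m j = '1' ∨ pvSym n m j = '0' ∨ pvSym n m j = '-' := by
  unfold pvSym
  split_ifs <;> simp

theorem pv_fmt_getD (n : Nat) (m : Int) (pos : Nat) (h : pos < n) :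
    (pvFmtBin n m).getD pos ' ' = pvSym n m pos := by
  simp [pvFmtBin, List.getD, h]

theorem pv_colA (l : List Int) (n j : Nat) (hne : l ≠ []) :
    (match (PySem.List.sorted l (fun x => x) false).map (fun m => pvSym n m j) with
     | [] => '-'
     | c :: _ =>
        if ((PySem.List.sorted l (fun x => x) false).map (fun m => pvSym n m j)).all
            (fun x => x == c)
        then c else '-')
    = (if l.all (fun m => pvSym n m j == '1') then '1'
       else if l.all (fun m => pvSym n m j == '0') then '0' else '-') := by
  cases hs : PySem.List.sorted l (fun x => x) false with
  | nil => exact absurd ((PySem.List.sorted_eq_nil_iff l (fun x => x) false).mp hs) hne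
  | cons a t =>
      have hmem : ∀ x, x ∈ a :: t ↔ x ∈ l := by
        intro x; rw [← hs]; exact PySem.List.mem_sorted l (fun x => x) false x
      have ha : a ∈ l := (hmem a).mp (List.mem_cons_self ..)
      simp only [List.map_cons]
      by_cases hEq : ((pvSym n a j :: t.map (fun m => pvSym n m j)).all
          (fun x => x == pvSym n a j)) = true
      · have hall : ∀ x ∈ l, pvSym n x j = pvSym n a j := by
          intro x hx
          have := (List.all_eq_true.mp (show ((a :: t).map (fun m => pvSym n m j)).all
              (fun x => x == pvSym n a j) = true from hEq)) (pvSym n x j)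
            (List.mem_map_of_mem ((hmem x).mpr hx))
          simpa using this
        rw [if_pos hEq]
        rcases pv_sym_cases n a j with h1 | h0 | hd
        · have : l.all (fun m => pvSym n m j == '1') = true := by
            rw [List.all_eq_true]; intro x hx; simp [hall x hx, h1]
          simp [this, h1]
        · have hno1 : l.all (fun m => pvSym n m j == '1') = false := by
            rw [List.all_eq_false]; exact ⟨a, ha, by simp [h0]⟩
          have : l.all (fun m => pvSym n m j == '0') = true := by
            rw [List.all_eq_true]; intro x hx; simp [hall x hx, h0]
          simp [this, hno1, h0]
        · have hno1 : l.all (fun m => pvSym n m j == '1') = false := by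
            rw [List.all_eq_false]; exact ⟨a, ha, by simp [hd]⟩
          have hno0 : l.all (fun m => pvSym n m j == '0') = false := by
            rw [List.all_eq_false]; exact ⟨a, ha, by simp [hd]⟩
          simp [hno1, hno0, hd]
      · have hEq' : ((pvSym n a j :: t.map (fun m => pvSym n m j)).all
            (fun x => x == pvSym n a j)) = false := by
          cases h : ((pvSym n a j :: t.map (fun m => pvSym n m j)).all
              (fun x => x == pvSym n a j))
          · rfl
          · exact absurd h hEq
        obtain ⟨x, hx, hxne⟩ := List.all_eq_false.mp
          (show ((a :: t).map (fun m => pvSym n m j)).all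
              (fun x => x == pvSym n a j) = false from hEq')
        obtain ⟨y, hy, rfl⟩ := List.mem_map.mp hx
        have hyl : y ∈ l := (hmem y).mp hy
        have hne2 : pvSym n y j ≠ pvSym n a j := by simpa using hxne
        have hno1 : l.all (fun m => pvSym n m j == '1') = false := by
          rw [List.all_eq_false]
          by_cases hga : pvSym n a j = '1'
          · exact ⟨y, hyl, by simp [hga ▸ hne2]⟩
          · exact ⟨a, ha, by simp [hga]⟩
        have hno0 : l.all (fun m => pvSym n m j == '0') = false := by
          rw [List.all_eq_false]
          by_cases hga : pvSym n a j = '0'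
          · exact ⟨y, hyl, by simp [hga ▸ hne2]⟩
          · exact ⟨a, ha, by simp [hga]⟩
        rw [if_neg (by simp [hEq'])]
        simp [hno1, hno0]

theorem pv_partsA (l : List Int) (n : Nat) : ∀ (vs : List String) (i : Nat) (acc : List String),
    (((List.range' i vs.length).map
        (fun pos => if l.all (fun m => pvSym n m pos == '1') then '1'
                    else if l.all (fun m => pvSym n m pos == '0') then '0' else '-')).zip vs).foldl
      (fun acc p =>
        if p.1 = '1' then acc ++ [p.2]
        else if p.1 = '0' then acc ++ ["~" ++ p.2]
        else acc) acc
    = acc ++ pvG l n vs i := by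
  intro vs
  induction vs with
  | nil => intro i acc; simp [pvG]
  | cons v vt ih =>
      intro i acc
      rw [show (v :: vt).length = vt.length + 1 from rfl, List.range'_succ]
      simp only [List.map_cons, List.zip_cons_cons, List.foldl_cons]
      by_cases h1 : l.all (fun m => pvSym n m i == '1') = true
      · rw [show (if l.all (fun m => pvSym n m i == '1') then '1'
                  else if l.all (fun m => pvSym n m i == '0') then '0' else '-') = '1'
              by simp [h1]]
        rw [if_pos rfl, ih (i + 1) (acc ++ [v])]
        simp [pvG, h1]
      · by_cases h2 : l.all (fun m => pvSym n m i == '0') = true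
        · rw [show (if l.all (fun m => pvSym n m i == '1') then '1'
                    else if l.all (fun m => pvSym n m i == '0') then '0' else '-') = '0'
                by simp [h1, h2]]
          rw [if_neg (by decide), if_pos rfl, ih (i + 1) (acc ++ ["~" ++ v])]
          simp [pvG, h1, h2]
        · rw [show (if l.all (fun m => pvSym n m i == '1') then '1'
                    else if l.all (fun m => pvSym n m i == '0') then '0' else '-') = '-'
                by simp [h1, h2]]
          rw [if_neg (by decide), if_neg (by decide), ih (i + 1) acc]
          simp [pvG, h1, h2]

theorem pv_A_eq (l : List Int) (vars : List String) (hne : l ≠ []) :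
    minterms_to_literal l vars
      = (if pvG l vars.length vars 0 = [] then "1"
         else PySem.Str.join " & " (pvG l vars.length vars 0)) := by
  unfold minterms_to_literal
  simp only []
  have hcommon :
      (List.range vars.length).map (fun pos =>
        match ((PySem.List.sorted l (fun x => x) false).map
                 (fun m => pvFmtBin vars.length m)).map (fun b => b.getD pos ' ') with
        | [] => '-'
        | c :: _ =>
            if (((PySem.List.sorted l (fun x => x) false).map
                  (fun m => pvFmtBin vars.length m)).map (fun b => b.getD pos ' ')).all
                (fun x => x == c)
            then c else '-')
      = (List.range vars.length).map (fun pos =>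
          if l.all (fun m => pvSym vars.length m pos == '1') then '1'
          else if l.all (fun m => pvSym vars.length m pos == '0') then '0' else '-') := by
    apply List.map_congr_left
    intro pos hpos
    have hlt : pos < vars.length := List.mem_range.mp hpos
    have hmap : ((PySem.List.sorted l (fun x => x) false).map
          (fun m => pvFmtBin vars.length m)).map (fun b => b.getD pos ' ')
        = (PySem.List.sorted l (fun x => x) false).map (fun m => pvSym vars.length m pos) := by
      rw [List.map_map]
      apply List.map_congr_left
      intro m _
      exact pv_fmt_getD vars.length m pos hlt
    rw [hmap]
    exact pv_colA l vars.length pos hne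
  rw [hcommon, List.range_eq_range']
  rw [pv_partsA l vars.length vars 0 []]
  simp

-- ----- B-side lemmas -----

theorem pv_width_ge (n : Nat) (m : Int) : n ≤ pvWidth n m := Nat.le_max_left _ _

-- inside the first n positions the full rendering agrees with pvFmtBin's symbol
theorem pv_symW_eq (n : Nat) (m : Int) (j : Nat) (hj : j < n) :
    pvSymW n m j = pvSym n m j := by
  unfold pvSymW pvSym pvShift
  have h := pv_width_ge n m
  rw [Nat.testBit_shiftRight]
  have e : pvWidth n m - n + (n - 1 - j) = pvWidth n m - 1 - j := by omega
  rw [e]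

theorem pvFmt_take (n : Nat) (m : Int) :
    (pvFmt n m).take n = (List.range n).map (pvSym n m) := by
  unfold pvFmt
  rw [← List.map_take, List.take_range, Nat.min_eq_left (pv_width_ge n m)]
  apply List.map_congr_left
  intro j hj
  exact pv_symW_eq n m j (List.mem_range.mp hj)

theorem pv_zip_take {α β : Type} : ∀ (xs : List α) (ys : List β),
    xs.zip ys = xs.zip (ys.take xs.length) := by
  intro xs
  induction xs with
  | nil => intro ys; simp
  | cons x xt ih =>
      intro ys
      cases ys with
      | nil => simp
      | cons y yt => simp [List.zip_cons_cons, ih yt]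

theorem pv_zipmap (g f : Nat → Char) : ∀ (l : List Nat),
    (((l.map g).zip (l.map f)).map (fun p => if p.2 == p.1 then p.1 else '-'))
    = l.map (fun i => if f i == g i then g i else '-') := by
  intro l
  induction l with
  | nil => rfl
  | cons a t ih => simp only [List.map_cons, List.zip_cons_cons, ih]

theorem pv_step (n : Nat) (g : Nat → Char) (m : Int) :
    ((((List.range n).map g).zip (pvFmt n m)).map (fun p => if p.2 == p.1 then p.1 else '-'))
    = (List.range n).map (fun i => if pvSym n m i == g i then g i else '-') := by
  rw [pv_zip_take ((List.range n).map g) (pvFmt n m)]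
  rw [show ((List.range n).map g).length = n by simp, pvFmt_take]
  exact pv_zipmap g (pvSym n m) (List.range n)

-- the merged pattern as a function of position (proof-side mirror of B's fold)
def pvMerge (n : Nat) : List Int → (Nat → Char) → Nat → Char
  | [], g => g
  | m :: t, g => pvMerge n t (fun i => if pvSym n m i == g i then g i else '-')

theorem pv_fold_merge (n : Nat) : ∀ (ms : List Int) (g : Nat → Char),
    ms.foldl (fun c m => (c.zip (pvFmt n m)).map (fun p => if p.2 == p.1 then p.1 else '-'))
      ((List.range n).map g)
    = (List.range n).map (pvMerge n ms g) := by
  intro ms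
  induction ms with
  | nil => intro g; rfl
  | cons m t ih =>
      intro g
      rw [List.foldl_cons, pv_step n g m]
      exact ih _

theorem pv_merge_eq (n : Nat) : ∀ (ms : List Int) (g : Nat → Char) (i : Nat),
    pvMerge n ms g i = if ms.all (fun m => pvSym n m i == g i) then g i else '-' := by
  intro ms
  induction ms with
  | nil => intro g i; simp [pvMerge]
  | cons m t ih =>
      intro g i
      rw [show pvMerge n (m :: t) g
            = pvMerge n t (fun i => if pvSym n m i == g i then g i else '-') from rfl]
      rw [ih]
      by_cases h : pvSym n m i = g i
      · simp [h]
      · have h1 : (pvSym n m i == g i) = false := by simp [h]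
        simp only [List.all_cons, h1, Bool.false_and]
        split_ifs <;> simp_all

theorem pv_char_eq (n : Nat) (m0 : Int) (ms : List Int) (i : Nat) :
    (if ms.all (fun m => pvSym n m i == pvSym n m0 i) then pvSym n m0 i else '-')
    = (if (m0 :: ms).all (fun m => pvSym n m i == '1') then '1'
       else if (m0 :: ms).all (fun m => pvSym n m i == '0') then '0' else '-') := by
  by_cases hall : ms.all (fun m => pvSym n m i == pvSym n m0 i) = true
  · rw [if_pos hall]
    have hA : ∀ x ∈ ms, pvSym n x i = pvSym n m0 i := by
      intro x hx
      have := List.all_eq_true.mp hall x hx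
      simpa using this
    rcases pv_sym_cases n m0 i with h | h | h
    · have : (m0 :: ms).all (fun m => pvSym n m i == '1') = true := by
        rw [List.all_eq_true]
        intro x hx
        rcases List.mem_cons.mp hx with rfl | hx
        · simp [h]
        · simp [hA x hx, h]
      simp [this, h]
    · have h1 : (m0 :: ms).all (fun m => pvSym n m i == '1') = false := by
        rw [List.all_eq_false]; exact ⟨m0, List.mem_cons_self .., by simp [h]⟩
      have h0 : (m0 :: ms).all (fun m => pvSym n m i == '0') = true := by
        rw [List.all_eq_true]
        intro x hx
        rcases List.mem_cons.mp hx with rfl | hx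
        · simp [h]
        · simp [hA x hx, h]
      simp [h1, h0, h]
    · have h1 : (m0 :: ms).all (fun m => pvSym n m i == '1') = false := by
        rw [List.all_eq_false]; exact ⟨m0, List.mem_cons_self .., by simp [h]⟩
      have h0 : (m0 :: ms).all (fun m => pvSym n m i == '0') = false := by
        rw [List.all_eq_false]; exact ⟨m0, List.mem_cons_self .., by simp [h]⟩
      simp [h1, h0, h]
  · rw [if_neg hall]
    have hall' : ms.all (fun m => pvSym n m i == pvSym n m0 i) = false := by
      cases h : ms.all (fun m => pvSym n m i == pvSym n m0 i)
      · rfl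
      · exact absurd h hall
    obtain ⟨x, hx, hxne0⟩ := List.all_eq_false.mp hall'
    have hxne : pvSym n x i ≠ pvSym n m0 i := by simpa using hxne0
    have h1 : (m0 :: ms).all (fun m => pvSym n m i == '1') = false := by
      rw [List.all_eq_false]
      by_cases hg : pvSym n m0 i = '1'
      · exact ⟨x, List.mem_cons_of_mem _ hx, by simp [hg ▸ hxne]⟩
      · exact ⟨m0, List.mem_cons_self .., by simp [hg]⟩
    have h0 : (m0 :: ms).all (fun m => pvSym n m i == '0') = false := by
      rw [List.all_eq_false]
      by_cases hg : pvSym n m0 i = '0'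
      · exact ⟨x, List.mem_cons_of_mem _ hx, by simp [hg ▸ hxne]⟩
      · exact ⟨m0, List.mem_cons_self .., by simp [hg]⟩
    simp [h1, h0]

theorem pv_partsB (l : List Int) (n : Nat) : ∀ (vs : List String) (i : Nat),
    ((((List.range' i vs.length).map (fun pos =>
        if l.all (fun m => pvSym n m pos == '1') then '1'
        else if l.all (fun m => pvSym n m pos == '0') then '0' else '-')).zip vs).filterMap
      (fun p => if p.1 == '1' || p.1 == '0' then
          some (if p.1 == '1' then p.2 else "~" ++ p.2) else none))
    = pvG l n vs i := by
  intro vs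
  induction vs with
  | nil => intro i; simp [pvG]
  | cons v vt ih =>
      intro i
      rw [show (v :: vt).length = vt.length + 1 from rfl, List.range'_succ]
      simp only [List.map_cons, List.zip_cons_cons]
      by_cases h1 : l.all (fun m => pvSym n m i == '1') = true
      · rw [show (if l.all (fun m => pvSym n m i == '1') then '1'
                  else if l.all (fun m => pvSym n m i == '0') then '0' else '-') = '1'
              by simp [h1]]
        rw [List.filterMap_cons, ih (i + 1)]
        simp [pvG, h1]
      · by_cases h2 : l.all (fun m => pvSym n m i == '0') = true
        · rw [show (if l.all (fun m => pvSym n m i == '1') then '1'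
                    else if l.all (fun m => pvSym n m i == '0') then '0' else '-') = '0'
                by simp [h1, h2]]
          rw [List.filterMap_cons, ih (i + 1)]
          simp [pvG, h1, h2]
        · rw [show (if l.all (fun m => pvSym n m i == '1') then '1'
                    else if l.all (fun m => pvSym n m i == '0') then '0' else '-') = '-'
                by simp [h1, h2]]
          rw [List.filterMap_cons, ih (i + 1)]
          simp [pvG, h1, h2]

theorem pv_B_eq (l : List Int) (vars : List String) (hne : l ≠ []) :
    minterms_to_literal_alt l vars
      = (if pvG l vars.length vars 0 = [] then "1"
         else PySem.Str.join " & " (pvG l vars.length vars 0)) := by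
  cases l with
  | nil => exact absurd rfl hne
  | cons m0 ms =>
      unfold minterms_to_literal_alt
      simp only []
      rw [pvFmt_take, pv_fold_merge]
      have hc : (List.range vars.length).map (pvMerge vars.length ms (pvSym vars.length m0))
          = (List.range vars.length).map (fun i =>
              if (m0 :: ms).all (fun m => pvSym vars.length m i == '1') then '1'
              else if (m0 :: ms).all (fun m => pvSym vars.length m i == '0') then '0' else '-') := by
        apply List.map_congr_left
        intro i _
        rw [pv_merge_eq, pv_char_eq]
      rw [hc, List.range_eq_range']
      rw [pv_partsB (m0 :: ms) vars.length vars 0]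

-- ===== VERDICT (by name: the statement is the Claim_ definition above) =====
theorem minterms_to_literal_spec : Claim_equal_minterms_to_literal := by
  intro minterms vars_list _hdom hpre
  unfold Spec_minterms_to_literal
  rw [pv_A_eq minterms vars_list hpre, pv_B_eq minterms vars_list hpre]
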